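-- pv_equiv track=rewrite | github.com/DFTPdev/Budget-Transparency | scripts/amendment_vault/parse_member_requests.py | map_to_spending_category
-- ===== SOURCE A (Python) =====
-- def map_to_spending_category(agency_name: str = "", secretariat_code: str = "") -> str:
--     """Map agency/secretariat to spending category ID"""
--     agency = agency_name.lower().strip()
--     secretariat = secretariat_code.lower().strip()
--
--     # Education
--     if "higher" in agency or "college" in agency or "university" in agency:
--         return "higher_education"
--     if "education" in agency or "education" in secretariat:
--         return "k12_education"
--
--     # Health & Human Resources
--     if any(kw in agency for kw in ["health", "medicaid", "dmas", "human services", "social services"]):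
--         return "health_and_human_resources"
--
--     # Public Safety
--     if any(kw in agency for kw in ["police", "corrections", "criminal", "emergency", "homeland", "public safety"]):
--         return "public_safety_and_homeland_security"
--
--     # Transportation
--     if any(kw in agency for kw in ["transportation", "vdot", "highway", "transit"]):
--         return "transportation"
--
--     # Natural Resources
--     if any(kw in agency for kw in ["environmental", "conservation", "wildlife", "parks", "forestry"]):
--         return "natural_resources"
--
--     # Commerce & Trade
--     if any(kw in agency for kw in ["commerce", "trade", "economic development", "tourism"]):
--         return "commerce_and_trade"
--
--     # Agriculture
--     if any(kw in agency for kw in ["agriculture", "farming", "vdacs"]):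
--         return "agriculture_and_forestry"
--
--     # Veterans
--     if any(kw in agency for kw in ["veteran", "military", "defense"]):
--         return "veterans_and_defense_affairs"
--
--     # Judicial
--     if any(kw in agency for kw in ["court", "judicial", "magistrate"]):
--         return "judicial"
--
--     # Legislative
--     if any(kw in agency for kw in ["general assembly", "legislative"]):
--         return "legislative"
--
--     # Default
--     return "independent_agencies"
-- ===== SOURCE B (Python) =====
-- CATEGORIES = [
--     "higher_education",
--     "k12_education",
--     "health_and_human_resources",
--     "public_safety_and_homeland_security",
--     "transportation",
--     "natural_resources",
--     "commerce_and_trade",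
--     "agriculture_and_forestry",
--     "veterans_and_defense_affairs",
--     "judicial",
--     "legislative",
--     "independent_agencies",
-- ]
--
-- # (keywords, also_search_secretariat) for each category, in priority order
-- RULES = [
--     (["higher", "college", "university"], False),
--     (["education"], True),
--     (["health", "medicaid", "dmas", "human services", "social services"], False),
--     (["police", "corrections", "criminal", "emergency", "homeland", "public safety"], False),
--     (["transportation", "vdot", "highway", "transit"], False),
--     (["environmental", "conservation", "wildlife", "parks", "forestry"], False),
--     (["commerce", "trade", "economic development", "tourism"], False),
--     (["agriculture", "farming", "vdacs"], False),
--     (["veteran", "military", "defense"], False),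
--     (["court", "judicial", "magistrate"], False),
--     (["general assembly", "legislative"], False),
-- ]
--
--
-- def map_to_spending_category(agency_name: str = "", secretariat_code: str = "") -> str:
--     """Map agency/secretariat to spending category ID.
--
--     Collects the indices of ALL matching rules, then returns the category of
--     the highest-priority (minimum-index) match; no short-circuiting cascade.
--     """
--     agency = agency_name.lower().strip()
--     secretariat = secretariat_code.lower().strip()
--     matched = [i for i, (kws, use_sec) in enumerate(RULES)
--                if any(kw in agency or (use_sec and kw in secretariat) for kw in kws)]
--     return CATEGORIES[min(matched, default=len(RULES))]
-- ===== Notes on version B (the rewrite author's own statement) =====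
-- stated objective: alternative
-- what changed: A short-circuits down a cascade of ifs returning at the first keyword hit; B collects the indices of ALL matching rules from a priority-ordered table and returns the category at the minimum matched index (collect-then-minimise instead of first-match early return).
import Mathlib
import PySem

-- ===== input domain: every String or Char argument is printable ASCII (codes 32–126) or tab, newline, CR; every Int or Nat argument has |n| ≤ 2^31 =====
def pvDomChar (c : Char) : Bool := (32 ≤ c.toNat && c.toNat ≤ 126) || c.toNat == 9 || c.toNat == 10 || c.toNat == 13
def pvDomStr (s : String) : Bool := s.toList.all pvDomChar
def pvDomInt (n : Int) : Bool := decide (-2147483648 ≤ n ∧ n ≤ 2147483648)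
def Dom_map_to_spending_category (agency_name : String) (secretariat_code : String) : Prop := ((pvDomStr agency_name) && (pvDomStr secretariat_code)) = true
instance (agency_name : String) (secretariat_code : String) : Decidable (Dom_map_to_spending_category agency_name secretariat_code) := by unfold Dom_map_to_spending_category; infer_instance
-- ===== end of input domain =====

-- B replaces A's short-circuiting cascade of ifs by a collect-then-minimise pass: it gathers the
-- indices of ALL matching rules and returns the category at the minimum index (alternative; same cost).

-- ===== PORT A =====
def map_to_spending_category (agency_name : String) (secretariat_code : String) : String :=
  let agency := PySem.Str.strip (PySem.Str.lower agency_name)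
  let secretariat := PySem.Str.strip (PySem.Str.lower secretariat_code)
  if PySem.Str.isIn "higher" agency || (PySem.Str.isIn "college" agency || PySem.Str.isIn "university" agency) then
    "higher_education"
  else if PySem.Str.isIn "education" agency || PySem.Str.isIn "education" secretariat then
    "k12_education"
  else if ["health", "medicaid", "dmas", "human services", "social services"].any (fun kw => PySem.Str.isIn kw agency) then
    "health_and_human_resources"
  else if ["police", "corrections", "criminal", "emergency", "homeland", "public safety"].any (fun kw => PySem.Str.isIn kw agency) then
    "public_safety_and_homeland_security"
  else if ["transportation", "vdot", "highway", "transit"].any (fun kw => PySem.Str.isIn kw agency) then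
    "transportation"
  else if ["environmental", "conservation", "wildlife", "parks", "forestry"].any (fun kw => PySem.Str.isIn kw agency) then
    "natural_resources"
  else if ["commerce", "trade", "economic development", "tourism"].any (fun kw => PySem.Str.isIn kw agency) then
    "commerce_and_trade"
  else if ["agriculture", "farming", "vdacs"].any (fun kw => PySem.Str.isIn kw agency) then
    "agriculture_and_forestry"
  else if ["veteran", "military", "defense"].any (fun kw => PySem.Str.isIn kw agency) then
    "veterans_and_defense_affairs"
  else if ["court", "judicial", "magistrate"].any (fun kw => PySem.Str.isIn kw agency) then
    "judicial"
  else if ["general assembly", "legislative"].any (fun kw => PySem.Str.isIn kw agency) then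
    "legislative"
  else
    "independent_agencies"

-- ===== PORT B =====
def pvCategories : List String :=
  [ "higher_education", "k12_education", "health_and_human_resources"
  , "public_safety_and_homeland_security", "transportation", "natural_resources"
  , "commerce_and_trade", "agriculture_and_forestry", "veterans_and_defense_affairs"
  , "judicial", "legislative", "independent_agencies" ]

-- (keywords, also_search_secretariat) per category, in priority order (Source B's RULES)
def pvRules : List (List String × Bool) :=
  [ (["higher", "college", "university"], false)
  , (["education"], true)
  , (["health", "medicaid", "dmas", "human services", "social services"], false)
  , (["police", "corrections", "criminal", "emergency", "homeland", "public safety"], false)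
  , (["transportation", "vdot", "highway", "transit"], false)
  , (["environmental", "conservation", "wildlife", "parks", "forestry"], false)
  , (["commerce", "trade", "economic development", "tourism"], false)
  , (["agriculture", "farming", "vdacs"], false)
  , (["veteran", "military", "defense"], false)
  , (["court", "judicial", "magistrate"], false)
  , (["general assembly", "legislative"], false) ]

def map_to_spending_category_alt (agency_name : String) (secretariat_code : String) : String :=
  let agency := PySem.Str.strip (PySem.Str.lower agency_name)
  let secretariat := PySem.Str.strip (PySem.Str.lower secretariat_code)
  let matched : List Int :=
    ((PySem.List.enumerate pvRules).filter
      (fun p => p.2.1.any (fun kw =>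
        PySem.Str.isIn kw agency || (p.2.2 && PySem.Str.isIn kw secretariat)))).map (fun p => p.1)
  -- CATEGORIES[min(matched, default=len(RULES))]; the index is always in range 0..11
  PySem.List.pyGetD pvCategories (PySem.List.minD matched (fun x => x) 11) ""

-- ===== PRECONDITION & SPEC =====
def Spec_map_to_spending_category (agency_name : String) (secretariat_code : String) (out : String) : Prop := out = map_to_spending_category_alt agency_name secretariat_code
instance (agency_name : String) (secretariat_code : String) (out : String) : Decidable (Spec_map_to_spending_category agency_name secretariat_code out) := by unfold Spec_map_to_spending_category; infer_instance

-- ===== CLAIM (what is proved, stated in full; the proofs are below) =====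
def Claim_equal_map_to_spending_category : Prop := ∀ (agency_name : String) (secretariat_code : String), Dom_map_to_spending_category agency_name secretariat_code → Spec_map_to_spending_category agency_name secretariat_code (map_to_spending_category agency_name secretariat_code)

-- ===== LEMMAS AND PROOFS =====

-- ===== VERDICT (by name: the statement is the Claim_ definition above) =====
set_option maxHeartbeats 4000000 in
theorem map_to_spending_category_spec : Claim_equal_map_to_spending_category := by
  intro agency_name secretariat_code _
  unfold Spec_map_to_spending_category map_to_spending_category map_to_spending_category_alt
  simp only [pvRules, pvCategories, PySem.List.enumerate_cons, PySem.List.enumerate_nil,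
    List.filter_cons, List.filter_nil, List.any_cons, List.any_nil,
    Bool.false_and, Bool.true_and, Bool.or_false]
  generalize (PySem.Str.isIn "higher" (PySem.Str.strip (PySem.Str.lower agency_name)) || (PySem.Str.isIn "college" (PySem.Str.strip (PySem.Str.lower agency_name)) || (PySem.Str.isIn "university" (PySem.Str.strip (PySem.Str.lower agency_name))))) = c1
  generalize (PySem.Str.isIn "education" (PySem.Str.strip (PySem.Str.lower agency_name)) || PySem.Str.isIn "education" (PySem.Str.strip (PySem.Str.lower secretariat_code))) = c2
  generalize (PySem.Str.isIn "health" (PySem.Str.strip (PySem.Str.lower agency_name)) || (PySem.Str.isIn "medicaid" (PySem.Str.strip (PySem.Str.lower agency_name)) || (PySem.Str.isIn "dmas" (PySem.Str.strip (PySem.Str.lower agency_name)) || (PySem.Str.isIn "human services" (PySem.Str.strip (PySem.Str.lower agency_name)) || (PySem.Str.isIn "social services" (PySem.Str.strip (PySem.Str.lower agency_name))))))) = c3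
  generalize (PySem.Str.isIn "police" (PySem.Str.strip (PySem.Str.lower agency_name)) || (PySem.Str.isIn "corrections" (PySem.Str.strip (PySem.Str.lower agency_name)) || (PySem.Str.isIn "criminal" (PySem.Str.strip (PySem.Str.lower agency_name)) || (PySem.Str.isIn "emergency" (PySem.Str.strip (PySem.Str.lower agency_name)) || (PySem.Str.isIn "homeland" (PySem.Str.strip (PySem.Str.lower agency_name)) || (PySem.Str.isIn "public safety" (PySem.Str.strip (PySem.Str.lower agency_name)))))))) = c4
  generalize (PySem.Str.isIn "transportation" (PySem.Str.strip (PySem.Str.lower agency_name)) || (PySem.Str.isIn "vdot" (PySem.Str.strip (PySem.Str.lower agency_name)) || (PySem.Str.isIn "highway" (PySem.Str.strip (PySem.Str.lower agency_name)) || (PySem.Str.isIn "transit" (PySem.Str.strip (PySem.Str.lower agency_name)))))) = c5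
  generalize (PySem.Str.isIn "environmental" (PySem.Str.strip (PySem.Str.lower agency_name)) || (PySem.Str.isIn "conservation" (PySem.Str.strip (PySem.Str.lower agency_name)) || (PySem.Str.isIn "wildlife" (PySem.Str.strip (PySem.Str.lower agency_name)) || (PySem.Str.isIn "parks" (PySem.Str.strip (PySem.Str.lower agency_name)) || (PySem.Str.isIn "forestry" (PySem.Str.strip (PySem.Str.lower agency_name))))))) = c6
  generalize (PySem.Str.isIn "commerce" (PySem.Str.strip (PySem.Str.lower agency_name)) || (PySem.Str.isIn "trade" (PySem.Str.strip (PySem.Str.lower agency_name)) || (PySem.Str.isIn "economic development" (PySem.Str.strip (PySem.Str.lower agency_name)) || (PySem.Str.isIn "tourism" (PySem.Str.strip (PySem.Str.lower agency_name)))))) = c7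
  generalize (PySem.Str.isIn "agriculture" (PySem.Str.strip (PySem.Str.lower agency_name)) || (PySem.Str.isIn "farming" (PySem.Str.strip (PySem.Str.lower agency_name)) || (PySem.Str.isIn "vdacs" (PySem.Str.strip (PySem.Str.lower agency_name))))) = c8
  generalize (PySem.Str.isIn "veteran" (PySem.Str.strip (PySem.Str.lower agency_name)) || (PySem.Str.isIn "military" (PySem.Str.strip (PySem.Str.lower agency_name)) || (PySem.Str.isIn "defense" (PySem.Str.strip (PySem.Str.lower agency_name))))) = c9
  generalize (PySem.Str.isIn "court" (PySem.Str.strip (PySem.Str.lower agency_name)) || (PySem.Str.isIn "judicial" (PySem.Str.strip (PySem.Str.lower agency_name)) || (PySem.Str.isIn "magistrate" (PySem.Str.strip (PySem.Str.lower agency_name))))) = c10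
  generalize (PySem.Str.isIn "general assembly" (PySem.Str.strip (PySem.Str.lower agency_name)) || (PySem.Str.isIn "legislative" (PySem.Str.strip (PySem.Str.lower agency_name)))) = c11
  revert c1 c2 c3 c4 c5 c6 c7 c8 c9 c10 c11
  decide
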